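-- pv_equiv track=rewrite | github.com/SimplePro/algorithm_practice | programmers/프로그래머스 방금그곡.py | solution
-- ===== SOURCE A (Python) =====
-- def replace_sharp(s):
--     return s.replace("A#", "a").replace("C#", 'c').replace("D#", 'd').replace("F#", 'f').replace("G#", 'g')
--
-- def extraction_minutes(start_time, end_time):
--     minute = 0
--     hour = 1 * (int(end_time.split(':')[0]) - int(start_time.split(':')[0]))
--     if hour == 0: minute = int(end_time.split(':')[1]) - int(start_time.split(':')[1])
--     else: minute = 60 * hour + int(end_time.split(':')[1]) - int(start_time.split(':')[1])
--     return minute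
--
-- def extraction_melody(melody, duration):
--     melody = replace_sharp(melody)
--     melody = melody*(duration // len(melody)+1)
--     return melody[:duration]
--
-- def solution(m, musicinfos):
--     m = replace_sharp(m)
--     play_time = [0]
--     play_title = ['(None)']
--     for music in musicinfos:
--         start_time, end_time, title, melody = music.split(',')
--         duration = extraction_minutes(start_time, end_time)
--         melody = extraction_melody(melody, duration)
--         if m in melody:
--             play_time.append(duration)
--             play_title.append(title)
--     return play_title[play_time.index(max(play_time))]
-- ===== SOURCE B (Python) =====
-- def replace_sharp(s):
--     return s.replace("A#", "a").replace("C#", 'c').replace("D#", 'd').replace("F#", 'f').replace("G#", 'g')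
--
-- def to_minutes(t):
--     parts = t.split(':')
--     return 60 * int(parts[0]) + int(parts[1])
--
-- def solution(m, musicinfos):
--     m = replace_sharp(m)
--     k = len(m)
--     best_time, best_title = 0, '(None)'
--     for music in musicinfos:
--         start, end, title, melody = music.split(',')
--         duration = to_minutes(end) - to_minutes(start)
--         tune = replace_sharp(melody)
--         L = len(tune)
--         # m occurs in the duration-minute playback iff it matches the infinite
--         # periodic repetition of tune at some start position i < L with i+k <= duration,
--         # checked by modular indexing -- no tiled string is ever built.
--         matched = k == 0 or (k <= duration and any(
--             all(tune[(i + j) % L] == m[j] for j in range(k))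
--             for i in range(min(L, duration - k + 1))))
--         if matched and best_time < duration:
--             best_time, best_title = duration, title
--     return best_title
-- ===== Notes on version B (the rewrite author's own statement) =====
-- stated objective: alternative
-- what changed: B never builds the tiled melody string: it tests the melody match by modular indexing into the un-tiled tune over at most len(tune) cyclic start positions (a match exists in the duration-long periodic playback iff one starts at a position below the period), computes durations as a difference of absolute minutes, and keeps a single-pass running maximum in two scalars instead of A's parallel lists plus index(max) second pass.
import Mathlib
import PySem

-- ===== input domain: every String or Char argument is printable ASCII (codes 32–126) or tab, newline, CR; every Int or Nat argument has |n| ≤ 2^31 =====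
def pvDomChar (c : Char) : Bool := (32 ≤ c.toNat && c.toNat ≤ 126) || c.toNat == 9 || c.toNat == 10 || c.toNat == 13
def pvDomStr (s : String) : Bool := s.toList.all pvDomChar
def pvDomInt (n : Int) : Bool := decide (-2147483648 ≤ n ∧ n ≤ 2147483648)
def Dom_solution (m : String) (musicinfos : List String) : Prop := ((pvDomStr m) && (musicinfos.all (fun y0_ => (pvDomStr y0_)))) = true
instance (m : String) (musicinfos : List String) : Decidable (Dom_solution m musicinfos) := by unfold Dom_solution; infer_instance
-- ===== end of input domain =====

-- B never builds the tiled melody string: it decides the match by modular indexing into the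
-- un-tiled tune over at most len(tune) cyclic start positions, and keeps a single-pass
-- running maximum in two scalars instead of A's parallel lists plus index(max) second pass.

-- ===== PORT A =====
def replaceSharp (s : String) : String :=
  PySem.Str.replace (PySem.Str.replace (PySem.Str.replace (PySem.Str.replace
    (PySem.Str.replace s "A#" "a") "C#" "c") "D#" "d") "F#" "f") "G#" "g"

-- int(t.split(':')[i]); the .getD defaults are unreachable under Pre_solution (Python raises there)
def timePart (t : String) (i : Nat) : Int :=
  (PySem.Int.ofStr? (((PySem.Str.split? t ":").getD []).getD i "")).getD 0

def extractionMinutes (startTime endTime : String) : Int :=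
  let hour := 1 * (timePart endTime 0 - timePart startTime 0)
  if hour = 0 then timePart endTime 1 - timePart startTime 1
  else 60 * hour + timePart endTime 1 - timePart startTime 1

def extractionMelody (melody : String) (duration : Int) : List Char :=
  let mel := (replaceSharp melody).toList
  let rep := PySem.List.pyRepeat mel (PySem.Int.floordiv duration (mel.length : Int) + 1)
  PySem.List.slice rep none (some duration)

def solution (m : String) (musicinfos : List String) : String :=
  let mC := (replaceSharp m).toList
  let st := musicinfos.foldl (fun (st : List Int × List String) music =>
    match PySem.Str.split? music "," with
    | some [startTime, endTime, title, melody] =>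
      let duration := extractionMinutes startTime endTime
      let mel := extractionMelody melody duration
      if PySem.Chars.isIn mC mel then (st.1 ++ [duration], st.2 ++ [title]) else st
    | _ => st) ([0], ["(None)"])
  let mx := (PySem.List.max? st.1 (fun y => y)).getD 0
  st.2.getD ((PySem.List.index? st.1 mx).getD 0) ""

-- ===== PORT B =====
def toMinutes (t : String) : Int :=
  let parts := (PySem.Str.split? t ":").getD []
  60 * (PySem.Int.ofStr? (parts.getD 0 "")).getD 0 + (PySem.Int.ofStr? (parts.getD 1 "")).getD 0

def solution_alt (m : String) (musicinfos : List String) : String :=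
  let mC := (replaceSharp m).toList
  let k := mC.length
  (musicinfos.foldl (fun (best : Int × String) music =>
    let parts := (PySem.Str.split? music ",").getD []
    if parts.length = 4 then
      let start := parts.getD 0 ""
      let «end» := parts.getD 1 ""
      let title := parts.getD 2 ""
      let melody := parts.getD 3 ""
      let duration := toMinutes «end» - toMinutes start
      let tune := (replaceSharp melody).toList
      let L := tune.length
      let matched := (k == 0) || (decide ((k : Int) ≤ duration) &&
        ((List.range (min (L : Int) (duration - (k : Int) + 1)).toNat).any (fun i =>
          (List.range k).all (fun j => tune.getD ((i + j) % L) ' ' == mC.getD j ' '))))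
      if matched && decide (best.1 < duration) then (duration, title) else best
    else best) (0, "(None)")).2

-- ===== PRECONDITION & SPEC =====
-- Pre_ excludes exactly the inputs where the Python A raises: a musicinfo whose comma-split is not
-- exactly 4 fields (unpack ValueError), a time field without a ':'-second piece (IndexError) or with a
-- non-int piece (ValueError), or an empty melody field (ZeroDivisionError).
def Pre_solution (m : String) (musicinfos : List String) : Prop :=
  ∀ music ∈ musicinfos,
    let parts := (PySem.Str.split? music ",").getD []
    let st := (PySem.Str.split? (parts.getD 0 "") ":").getD []
    let en := (PySem.Str.split? (parts.getD 1 "") ":").getD []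
    parts.length = 4 ∧
    (2 ≤ st.length ∧ (PySem.Int.ofStr? (st.getD 0 "")).isSome ∧ (PySem.Int.ofStr? (st.getD 1 "")).isSome) ∧
    (2 ≤ en.length ∧ (PySem.Int.ofStr? (en.getD 0 "")).isSome ∧ (PySem.Int.ofStr? (en.getD 1 "")).isSome) ∧
    parts.getD 3 "" ≠ ""

instance (m : String) (musicinfos : List String) : Decidable (Pre_solution m musicinfos) := by
  unfold Pre_solution; infer_instance

def pvWitness_solution : String × List String := ("ABC", ["12:00,12:04,tune,ABCD"])

def Spec_solution (m : String) (musicinfos : List String) (out : String) : Prop := out = solution_alt m musicinfos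
instance (m : String) (musicinfos : List String) (out : String) : Decidable (Spec_solution m musicinfos out) := by unfold Spec_solution; infer_instance

-- ===== CLAIM (what is proved, stated in full; the proofs are below) =====
def Claim_equal_solution : Prop := ∀ (m : String) (musicinfos : List String), Dom_solution m musicinfos → Pre_solution m musicinfos → Spec_solution m musicinfos (solution m musicinfos)

-- ===== LEMMAS AND PROOFS =====

-- one music entry: the (duration, title) pair A appends, or none
def pvMatch (mC : List Char) (music : String) : Option (Int × String) :=
  match PySem.Str.split? music "," with
  | some [startTime, endTime, title, melody] =>
    let d := extractionMinutes startTime endTime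
    if PySem.Chars.isIn mC (extractionMelody melody d) then some (d, title) else none
  | _ => none

-- B's running-max update
def pvPick (b : Int × String) (p : Int × String) : Int × String := if b.1 < p.1 then p else b

theorem durations_eq (s e : String) : extractionMinutes s e = toMinutes e - toMinutes s := by
  simp only [extractionMinutes, toMinutes, timePart]
  split <;> omega

theorem fdiv_pos_eq_ediv (a L : Int) (h : 0 < L) : PySem.Int.floordiv a L = a / L := by
  show a.fdiv L = a / L
  rw [Int.fdiv_eq_ediv]; simp [h.le]

theorem length_flatten_replicate {α : Type} (n : Nat) (c : List α) :
    ((List.replicate n c).flatten).length = n * c.length := by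
  simp [List.length_flatten, List.map_replicate, List.sum_replicate, smul_eq_mul]

theorem getD_flatten_replicate (c : List Char) (n i : Nat) (h : i < n * c.length) :
    ((List.replicate n c).flatten).getD i ' ' = c.getD (i % c.length) ' ' := by
  induction n generalizing i with
  | zero => omega
  | succ n ih =>
    rw [List.replicate_succ, List.flatten_cons]
    by_cases hi : i < c.length
    · rw [List.getD_append _ _ _ _ hi, Nat.mod_eq_of_lt hi]
    · have hle : c.length ≤ i := le_of_not_gt hi
      rw [List.getD_append_right _ _ _ _ hle,
        ih (i - c.length) (by rw [Nat.succ_mul] at h; omega),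
        Nat.mod_eq_sub_mod hle]

-- the cyclic-index membership test of B equals Python's 'm in track' on A's tiled track
theorem prefix_drop_iff (mC track : List Char) (hmC : mC ≠ []) (p : Nat) :
    mC <+: track.drop p ↔
      (p + mC.length ≤ track.length ∧ ∀ j < mC.length, track.getD (p + j) ' ' = mC.getD j ' ') := by
  constructor
  · intro h
    have hlen := h.length_le
    rw [List.length_drop] at hlen
    have hk1 : 1 ≤ mC.length := List.length_pos_iff.mpr hmC
    refine ⟨by omega, fun j hj => ?_⟩
    obtain ⟨t, ht⟩ := h
    have h1 : track.getD (p + j) ' ' = (track.drop p).getD j ' ' := by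
      simp [List.getD_eq_getElem?_getD, List.getElem?_drop]
    rw [h1, ← ht, List.getD_append _ _ _ _ hj]
  · rintro ⟨hlen, hel⟩
    have heq : (track.drop p).take mC.length = mC := by
      apply List.ext_getElem?
      intro i
      by_cases hi : i < mC.length
      · have hit : p + i < track.length := by omega
        rw [List.getElem?_take_of_lt hi, List.getElem?_drop,
          List.getElem?_eq_getElem hit, List.getElem?_eq_getElem hi]
        have h2 := hel i hi
        rw [List.getD_eq_getElem track ' ' hit, List.getD_eq_getElem mC ' ' hi] at h2
        simp [h2]
      · rw [List.getElem?_eq_none (by simp; omega), List.getElem?_eq_none (by omega)]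
    exact heq ▸ List.take_prefix _ _

theorem isIn_track (mC tune : List Char) (d : Int) :
    ((mC.length == 0) || (decide ((mC.length : Int) ≤ d) &&
      ((List.range (min ((tune.length : Int)) (d - (mC.length : Int) + 1)).toNat).any (fun i =>
        (List.range mC.length).all (fun j => tune.getD ((i + j) % tune.length) ' ' == mC.getD j ' ')))))
    = PySem.Chars.isIn mC (PySem.List.slice (PySem.List.pyRepeat tune (PySem.Int.floordiv d (tune.length : Int) + 1)) none (some d)) := by
  by_cases hk0 : mC.length = 0
  · have hmC : mC = [] := List.length_eq_zero_iff.mp hk0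
    subst hmC
    simp [PySem.Chars.isIn_nil]
  · have hkpos : 0 < mC.length := Nat.pos_of_ne_zero hk0
    have hmC : mC ≠ [] := by intro h; subst h; simp at hk0
    by_cases hL0 : tune.length = 0
    · have htune : tune = [] := List.length_eq_zero_iff.mp hL0
      subst htune
      have hrep : PySem.List.pyRepeat ([] : List Char) (PySem.Int.floordiv d (([] : List Char).length : Int) + 1) = [] := by
        simp [PySem.List.pyRepeat]
      rw [hrep]
      have hsl : PySem.List.slice ([] : List Char) none (some d) = [] := by
        simp [PySem.List.slice]
      rw [hsl]
      have hno : PySem.Chars.isIn mC [] = false := by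
        rw [PySem.Chars.isIn_eq_false_iff]
        intro h
        have h2 := h.length_le
        simp only [List.length_nil, Nat.le_zero] at h2
        exact hk0 h2
      rw [hno]
      have hmin : (min ((([] : List Char).length : Int)) (d - (mC.length : Int) + 1)).toNat = 0 := by
        have h1 : (min ((([] : List Char).length : Int)) (d - (mC.length : Int) + 1)) ≤ (([] : List Char).length : Int) :=
          min_le_left _ _
        simp only [List.length_nil, Nat.cast_zero] at h1
        omega
      rw [hmin]
      simp [hk0]
    · have hLpos : 0 < tune.length := Nat.pos_of_ne_zero hL0
      have hLi : (0 : Int) < (tune.length : Int) := by exact_mod_cast hLpos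
      rw [fdiv_pos_eq_ediv _ _ hLi]
      by_cases hkd : (mC.length : Int) ≤ d
      case neg =>
        -- k > d: B's length guard is false and A's track is shorter than m
        by_cases h0 : (0 : Int) ≤ d
        · rw [PySem.List.slice_to _ h0]
          have hlen : ((PySem.List.pyRepeat tune (d / (tune.length : Int) + 1)).take d.toNat).length ≤ d.toNat := by
            rw [List.length_take]; exact min_le_left _ _
          have hno : PySem.Chars.isIn mC ((PySem.List.pyRepeat tune (d / (tune.length : Int) + 1)).take d.toNat) = false := by
            rw [PySem.Chars.isIn_eq_false_iff]
            intro h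
            have h2 := h.length_le
            omega
          rw [hno]
          simp [hk0, hkd]
        · have hneg : d / (tune.length : Int) < 0 := Int.ediv_neg_of_neg_of_pos (by omega) hLi
          have e0 : (d / (tune.length : Int) + 1).toNat = 0 := by omega
          have hrep : PySem.List.pyRepeat tune (d / (tune.length : Int) + 1) = [] := by
            simp [PySem.List.pyRepeat, e0]
          rw [hrep]
          have hsl : PySem.List.slice ([] : List Char) none (some d) = [] := by
            simp [PySem.List.slice]
          rw [hsl]
          have hno : PySem.Chars.isIn mC [] = false := by
            rw [PySem.Chars.isIn_eq_false_iff]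
            intro h
            have h2 := h.length_le
            simp only [List.length_nil, Nat.le_zero] at h2
            exact hk0 h2
          rw [hno]
          simp [hk0, hkd]
      case pos =>
        -- main case: 1 ≤ k ≤ d
        have h0d : (0 : Int) ≤ d := le_trans (by exact_mod_cast Nat.zero_le _) hkd
        rw [PySem.List.slice_to _ h0d]
        set N := (d / (tune.length : Int) + 1).toNat with hN
        have hrep : PySem.List.pyRepeat tune (d / (tune.length : Int) + 1) = (List.replicate N tune).flatten := by
          simp [PySem.List.pyRepeat, hN]
        rw [hrep]
        have hqn : 0 ≤ d / (tune.length : Int) := Int.ediv_nonneg h0d hLi.le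
        have hNc : (N : Int) = d / (tune.length : Int) + 1 := by omega
        have hq := Int.emod_lt_of_pos d hLi
        have hq0 := Int.emod_nonneg d (by omega : (tune.length : Int) ≠ 0)
        have hq2 := Int.mul_ediv_add_emod d (tune.length : Int)
        have hprod : ((N * tune.length : Nat) : Int) = (d / (tune.length : Int) + 1) * (tune.length : Int) := by
          rw [Nat.cast_mul, hNc]
        have hkey : (d / (tune.length : Int) + 1) * (tune.length : Int)
            = (tune.length : Int) * (d / (tune.length : Int)) + (tune.length : Int) := by ring
        have hDN : d.toNat ≤ N * tune.length := by omega
        have hlenflat : ((List.replicate N tune).flatten).length = N * tune.length :=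
          length_flatten_replicate N tune
        have htl : (((List.replicate N tune).flatten).take d.toNat).length = d.toNat := by
          rw [List.length_take, hlenflat]; omega
        have htget : ∀ x < d.toNat,
            (((List.replicate N tune).flatten).take d.toNat).getD x ' ' = tune.getD (x % tune.length) ' ' := by
          intro x hx
          have h1 : (((List.replicate N tune).flatten).take d.toNat).getD x ' '
              = ((List.replicate N tune).flatten).getD x ' ' := by
            simp [List.getD_eq_getElem?_getD, hx]
          rw [h1, getD_flatten_replicate tune N x (by omega)]
        rw [Bool.eq_iff_iff]
        simp only [Bool.or_eq_true, Bool.and_eq_true, beq_iff_eq, decide_eq_true_eq,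
          List.any_eq_true, List.all_eq_true, List.mem_range, PySem.Chars.isIn_iff_infix]
        have hinf : mC <:+: (((List.replicate N tune).flatten).take d.toNat) ↔
            ∃ p, mC <+: ((((List.replicate N tune).flatten).take d.toNat)).drop p := by
          rw [← PySem.Chars.isIn_iff_infix]
          exact (PySem.Chars.exists_prefix_drop_iff_isIn mC _).symm
        rw [hinf]
        constructor
        · rintro (hk | ⟨-, i, hiN, hP⟩)
          · exact absurd hk hk0
          · have h1 : (i : Int) < min ((tune.length : Int)) (d - (mC.length : Int) + 1) := by omega
            have h2 := lt_min_iff.mp h1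
            refine ⟨i, (prefix_drop_iff mC _ hmC i).mpr ⟨by rw [htl]; omega, fun j hj => ?_⟩⟩
            rw [htget (i + j) (by omega)]
            have := hP j hj
            exact this
        · rintro ⟨p, hp⟩
          rw [prefix_drop_iff mC _ hmC p] at hp
          obtain ⟨hplen, hel⟩ := hp
          rw [htl] at hplen
          right
          have h1 : p % tune.length < tune.length := Nat.mod_lt _ hLpos
          have h2 : p % tune.length ≤ p := Nat.mod_le _ _
          refine ⟨hkd, p % tune.length, ?_, fun j hj => ?_⟩
          · have h3 : ((p % tune.length : Nat) : Int) < min ((tune.length : Int)) (d - (mC.length : Int) + 1) := by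
              rw [lt_min_iff]
              constructor
              · exact_mod_cast h1
              · omega
            omega
          · rw [Nat.mod_add_mod, ← htget (p + j) (by omega)]
            exact hel j hj


-- per-music step of B's fold, in terms of pvMatch
theorem stepB_eq (mC : List Char) (b : Int × String) (music : String) :
    (let parts := (PySem.Str.split? music ",").getD []
     if parts.length = 4 then
       let start := parts.getD 0 ""
       let «end» := parts.getD 1 ""
       let title := parts.getD 2 ""
       let melody := parts.getD 3 ""
       let duration := toMinutes «end» - toMinutes start
       let tune := (replaceSharp melody).toList
       let L := tune.length
       let matched := (mC.length == 0) || (decide ((mC.length : Int) ≤ duration) &&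
         ((List.range (min (L : Int) (duration - (mC.length : Int) + 1)).toNat).any (fun i =>
           (List.range mC.length).all (fun j => tune.getD ((i + j) % L) ' ' == mC.getD j ' '))))
       if matched && decide (b.1 < duration) then (duration, title) else b
     else b)
    = ((pvMatch mC music).map (pvPick b)).getD b := by
  rcases h : PySem.Str.split? music "," with _ | parts
  · simp [pvMatch, h]
  · rcases parts with _ | ⟨s, _ | ⟨e, _ | ⟨t, _ | ⟨mel, _ | ⟨x, rest⟩⟩⟩⟩⟩ <;>
      simp only [pvMatch, h, Option.getD_some, Option.map_none, Option.getD_none,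
        List.length_cons, List.length_nil, List.getD_cons_zero, List.getD_cons_succ]
    · rfl
    · rfl
    · rfl
    · rfl
    · rw [if_pos trivial]
      rw [durations_eq]
      rw [show extractionMelody mel (toMinutes e - toMinutes s)
            = PySem.List.slice (PySem.List.pyRepeat (replaceSharp mel).toList
                (PySem.Int.floordiv (toMinutes e - toMinutes s) (((replaceSharp mel).toList.length : Int)) + 1))
                none (some (toMinutes e - toMinutes s)) from rfl]
      rw [← isIn_track]
      cases hin : ((mC.length == 0) || (decide ((mC.length : Int) ≤ toMinutes e - toMinutes s) &&
        ((List.range (min (((replaceSharp mel).toList.length : Int)) (toMinutes e - toMinutes s - (mC.length : Int) + 1)).toNat).any (fun i =>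
          (List.range mC.length).all (fun j => (replaceSharp mel).toList.getD ((i + j) % (replaceSharp mel).toList.length) ' ' == mC.getD j ' ')))))
      · simp
      · by_cases hlt : b.1 < toMinutes e - toMinutes s <;> simp [hlt, pvPick]
    · rw [if_neg (by omega)]

theorem foldB_eq (mC : List Char) (mus : List String) (b : Int × String) :
    mus.foldl (fun (best : Int × String) music =>
      let parts := (PySem.Str.split? music ",").getD []
      if parts.length = 4 then
        let start := parts.getD 0 ""
        let «end» := parts.getD 1 ""
        let title := parts.getD 2 ""
        let melody := parts.getD 3 ""
        let duration := toMinutes «end» - toMinutes start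
        let tune := (replaceSharp melody).toList
        let L := tune.length
        let matched := (mC.length == 0) || (decide ((mC.length : Int) ≤ duration) &&
          ((List.range (min (L : Int) (duration - (mC.length : Int) + 1)).toNat).any (fun i =>
            (List.range mC.length).all (fun j => tune.getD ((i + j) % L) ' ' == mC.getD j ' '))))
        if matched && decide (best.1 < duration) then (duration, title) else best
      else best) b
    = (mus.filterMap (pvMatch mC)).foldl pvPick b := by
  induction mus generalizing b with
  | nil => rfl
  | cons music rest ih =>
    rw [List.foldl_cons, List.filterMap_cons, stepB_eq]
    rcases h : pvMatch mC music with _ | p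
    · simp only [Option.map_none, Option.getD_none]
      exact ih b
    · simp only [Option.map_some, Option.getD_some, List.foldl_cons]
      exact ih (pvPick b p)

theorem stepA_eq (mC : List Char) (st : List Int × List String) (music : String) :
    (match PySem.Str.split? music "," with
     | some [startTime, endTime, title, melody] =>
       let duration := extractionMinutes startTime endTime
       let mel := extractionMelody melody duration
       if PySem.Chars.isIn mC mel then (st.1 ++ [duration], st.2 ++ [title]) else st
     | _ => st)
    = (match pvMatch mC music with
       | some p => (st.1 ++ [p.1], st.2 ++ [p.2])
       | none => st) := by
  rcases h : PySem.Str.split? music "," with _ | parts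
  · simp [pvMatch, h]
  · rcases parts with _ | ⟨s, _ | ⟨e, _ | ⟨t, _ | ⟨mel, _ | ⟨x, rest⟩⟩⟩⟩⟩ <;>
      simp only [pvMatch, h]
    cases hin : PySem.Chars.isIn mC (extractionMelody mel (extractionMinutes s e)) <;> simp

theorem foldA_eq (mC : List Char) (mus : List String) (l1 : List Int) (l2 : List String) :
    mus.foldl (fun (st : List Int × List String) music =>
      match PySem.Str.split? music "," with
      | some [startTime, endTime, title, melody] =>
        let duration := extractionMinutes startTime endTime
        let mel := extractionMelody melody duration
        if PySem.Chars.isIn mC mel then (st.1 ++ [duration], st.2 ++ [title]) else st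
      | _ => st) (l1, l2)
    = (l1 ++ (mus.filterMap (pvMatch mC)).map Prod.fst,
       l2 ++ (mus.filterMap (pvMatch mC)).map Prod.snd) := by
  induction mus generalizing l1 l2 with
  | nil => simp
  | cons music rest ih =>
    rw [List.foldl_cons, stepA_eq, List.filterMap_cons]
    rcases h : pvMatch mC music with _ | p
    · exact ih l1 l2
    · simp only [List.map_cons]
      rw [ih (l1 ++ [p.1]) (l2 ++ [p.2])]
      simp

theorem sel_eq (M : List (Int × String)) (b : Int × String) :
    (b.2 :: M.map Prod.snd).getD
      ((PySem.List.index? (b.1 :: M.map Prod.fst)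
        (((PySem.List.max? (b.1 :: M.map Prod.fst) (fun y => y)).getD 0))).getD 0) ""
    = (M.foldl pvPick b).2 := by
  induction M generalizing b with
  | nil =>
    simp [PySem.List.max?_id_cons, PySem.List.index?_eq_idxOf?, List.idxOf?_cons]
  | cons p M ih =>
    obtain ⟨d, t⟩ := p
    rw [List.foldl_cons]
    by_cases hbd : b.1 < d
    · have hpick : pvPick b (d, t) = (d, t) := by simp [pvPick, hbd]
      rw [hpick]
      have ihd := ih (d, t)
      rw [PySem.List.max?_id_cons] at ihd ⊢
      simp only [List.map_cons, Option.getD_some, List.foldl_cons] at ihd ⊢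
      rw [max_eq_right hbd.le]
      set mx := List.foldl max d (M.map Prod.fst) with hmx
      have hdmx : d ≤ mx := (PySem.List.le_foldl_max _ _).1
      have hne : (b.1 == mx) = false := beq_eq_false_iff_ne.mpr (by omega)
      rw [PySem.List.index?_eq_idxOf?] at ihd ⊢
      rw [List.idxOf?_cons, hne, if_neg Bool.false_ne_true]
      have hmem : mx ∈ (d, t).1 :: M.map Prod.fst := by
        rcases PySem.List.foldl_max_mem (M.map Prod.fst) d with h | h
        · exact h ▸ List.mem_cons_self
        · exact List.mem_cons_of_mem _ h
      obtain ⟨i, hidx⟩ := Option.isSome_iff_exists.mp (List.isSome_idxOf?.mpr hmem)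
      rw [hidx] at ihd ⊢
      simp only [Option.map_some, Option.getD_some, List.getD_cons_succ]
      exact ihd
    · have hpick : pvPick b (d, t) = b := by simp [pvPick, hbd]
      rw [hpick]
      have ihb := ih b
      rw [PySem.List.max?_id_cons] at ihb ⊢
      simp only [List.map_cons, Option.getD_some, List.foldl_cons] at ihb ⊢
      rw [max_eq_left (by omega)]
      set mx := List.foldl max b.1 (M.map Prod.fst) with hmx
      have hbmx : b.1 ≤ mx := (PySem.List.le_foldl_max _ _).1
      rw [PySem.List.index?_eq_idxOf?] at ihb ⊢
      by_cases hb : b.1 = mx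
      · rw [List.idxOf?_cons, if_pos (by simp [hb])]
        rw [List.idxOf?_cons, if_pos (by simp [hb])] at ihb
        simpa using ihb
      · have hne : (b.1 == mx) = false := beq_eq_false_iff_ne.mpr hb
        have hdne : ((d, t).1 == mx) = false := beq_eq_false_iff_ne.mpr (by show d ≠ mx; omega)
        rw [List.idxOf?_cons, hne, if_neg Bool.false_ne_true] at ihb ⊢
        rw [List.idxOf?_cons, hdne, if_neg Bool.false_ne_true]
        have hmem : mx ∈ M.map Prod.fst := by
          rcases PySem.List.foldl_max_mem (M.map Prod.fst) b.1 with h | h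
          · exact absurd h.symm hb
          · exact h
        obtain ⟨i, hidx⟩ := Option.isSome_iff_exists.mp (List.isSome_idxOf?.mpr hmem)
        rw [hidx] at ihb ⊢
        simp only [Option.map_some, Option.getD_some, List.getD_cons_succ] at ihb ⊢
        exact ihb

-- ===== VERDICT (by name: the statement is the Claim_ definition above) =====
theorem solution_spec : Claim_equal_solution := by
  intro m musicinfos _ _
  unfold Spec_solution
  simp only [solution, solution_alt]
  rw [foldA_eq, foldB_eq]
  simp only [List.singleton_append]
  exact sel_eq _ (0, "(None)")
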